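-- pv_equiv track=rewrite | github.com/Mr-xiaotian/CelestialVault | tools/NumberUtils.py | check_numbers_validity
-- ===== SOURCE A (Python) =====
-- def check_numbers_validity(matrix):
--     """
--     检查方阵中的数字是否是从 1 到 n^2 的所有整数，且没有重复。
--
--     :param matrix: 方阵（二维列表）
--     :return: 如果数字是从 1 到 n^2 的连续整数且没有重复，返回 True，否则返回 False
--     """
--     # 获取方阵的阶数
--     n = len(matrix)
--     numbers = set()
--
--     for row in matrix:
--         for num in row:
--             if num < 1 or num > n**2 or num in numbers:
--                 return False
--             numbers.add(num)
--
--     return True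
-- ===== SOURCE B (Python) =====
-- def check_numbers_validity(matrix):
--     n = len(matrix)
--     flat = sorted(num for row in matrix for num in row)
--     if not flat:
--         return True
--     if flat[0] < 1 or flat[-1] > n * n:
--         return False
--     return all(a < b for a, b in zip(flat, flat[1:]))
-- ===== Notes on version B (the rewrite author's own statement) =====
-- stated objective: alternative
-- what changed: Replaces A's single early-exit pass with a mutated seen-set by a sort-based algorithm: flatten, sort, check the range via only the minimum (first) and maximum (last) element, and detect duplicates by a strictly-increasing adjacent-pair scan with no set at all.
import Mathlib
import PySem

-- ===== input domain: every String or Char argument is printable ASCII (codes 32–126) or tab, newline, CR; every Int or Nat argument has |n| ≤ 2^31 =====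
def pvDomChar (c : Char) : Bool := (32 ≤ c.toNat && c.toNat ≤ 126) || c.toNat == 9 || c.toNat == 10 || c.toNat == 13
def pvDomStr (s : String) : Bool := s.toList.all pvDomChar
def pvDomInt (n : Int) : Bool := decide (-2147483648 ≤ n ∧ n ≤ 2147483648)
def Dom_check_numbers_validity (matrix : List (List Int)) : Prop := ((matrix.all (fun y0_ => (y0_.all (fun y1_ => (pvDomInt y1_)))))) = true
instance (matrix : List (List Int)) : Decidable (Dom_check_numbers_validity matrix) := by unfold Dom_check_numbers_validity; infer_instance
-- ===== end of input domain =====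

-- B replaces A's single early-exit pass with a mutated seen-set by a sort-based
-- algorithm: flatten, sort, range-check only min and max, duplicates by an
-- adjacent-pair strict-increase scan (no set) — an alternative of similar size.

-- ===== PORT A =====
-- inner 'for num in row' loop: none = the early 'return False'
def pvRowA (n2 : Int) : PySem.Set Int → List Int → Option (PySem.Set Int)
  | seen, [] => some seen
  | seen, num :: rest =>
    if decide (num < 1) || decide (num > n2) || PySem.Set.contains seen num then none
    else pvRowA n2 (PySem.Set.add seen num) rest

-- outer 'for row in matrix' loop
def pvRowsA (n2 : Int) : PySem.Set Int → List (List Int) → Option (PySem.Set Int)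
  | seen, [] => some seen
  | seen, row :: rest =>
    match pvRowA n2 seen row with
    | none => none
    | some seen' => pvRowsA n2 seen' rest

def check_numbers_validity (matrix : List (List Int)) : Bool :=
  let n : Int := matrix.length
  (pvRowsA (n ^ 2) PySem.Set.empty matrix).isSome

-- ===== PORT B =====
def check_numbers_validity_alt (matrix : List (List Int)) : Bool :=
  let n : Int := matrix.length
  let flat := PySem.List.sorted (matrix.flatMap fun row => row) (fun x => x) false
  match flat with
  | [] => true          -- 'if not flat: return True'
  | x :: rest =>
    if decide (x < 1) || decide ((x :: rest).getLast (List.cons_ne_nil x rest) > n * n) then false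
    else ((x :: rest).zip rest).all (fun p => decide (p.1 < p.2))   -- zip(flat, flat[1:])

-- ===== PRECONDITION & SPEC =====
def Spec_check_numbers_validity (matrix : List (List Int)) (out : Bool) : Prop := out = check_numbers_validity_alt matrix
instance (matrix : List (List Int)) (out : Bool) : Decidable (Spec_check_numbers_validity matrix out) := by unfold Spec_check_numbers_validity; infer_instance

-- ===== CLAIM (what is proved, stated in full; the proofs are below) =====
def Claim_equal_check_numbers_validity : Prop := ∀ (matrix : List (List Int)), Dom_check_numbers_validity matrix → Spec_check_numbers_validity matrix (check_numbers_validity matrix)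

-- ===== LEMMAS AND PROOFS =====

-- A's inner loop on a concatenation runs the two parts in sequence
theorem pvRowA_append (n2 : Int) (a b : List Int) :
    ∀ seen, pvRowA n2 seen (a ++ b) = (pvRowA n2 seen a).bind (fun s => pvRowA n2 s b) := by
  induction a with
  | nil => intro seen; simp [pvRowA]
  | cons x xs ih =>
    intro seen
    simp only [List.cons_append, pvRowA]
    split
    · rfl
    · exact ih _

-- A's two nested loops are the inner loop on the flattened matrix
theorem pvRowsA_eq_flat (n2 : Int) (m : List (List Int)) :
    ∀ seen, pvRowsA n2 seen m = pvRowA n2 seen (m.flatMap (fun row => row)) := by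
  induction m with
  | nil => intro seen; simp [pvRowsA, pvRowA]
  | cons row rest ih =>
    intro seen
    simp only [pvRowsA, List.flatMap_cons, pvRowA_append]
    cases h : pvRowA n2 seen row with
    | none => simp
    | some s => simp [ih]

-- characterisation of A's loop succeeding
theorem pvRowA_isSome_iff (n2 : Int) (l : List Int) :
    ∀ seen : List Int, (pvRowA n2 seen l).isSome = true ↔
      ((∀ x ∈ l, 1 ≤ x ∧ x ≤ n2) ∧ l.Nodup ∧ ∀ x ∈ l, x ∉ seen) := by
  induction l with
  | nil => intro seen; simp [pvRowA]
  | cons x xs ih =>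
    intro seen
    simp only [pvRowA]
    by_cases h1 : x < 1
    · simp [h1]
    · by_cases h2 : x > n2
      · simp [h1, h2]
      · by_cases h3 : x ∈ seen
        · have hct : PySem.Set.contains seen x = true := (PySem.Set.contains_iff _ _).mpr h3
          simp [h1, h2, h3]
        · have hc : PySem.Set.contains seen x = false := by
            cases hc : PySem.Set.contains seen x with
            | false => rfl
            | true => exact absurd ((PySem.Set.contains_iff _ _).mp hc) h3
          simp only [h1, h2, hc, decide_false, Bool.or_false, Bool.false_eq_true, if_false]
          rw [ih]
          simp only [List.mem_cons, List.nodup_cons]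
          constructor
          · rintro ⟨hr, hn, hs⟩
            refine ⟨?_, ⟨?_, hn⟩, ?_⟩
            · rintro y (rfl | hy)
              · exact ⟨by omega, by omega⟩
              · exact hr y hy
            · exact fun hxm => hs x hxm ((PySem.Set.mem_add _ _ _).mpr (Or.inr rfl))
            · rintro y (rfl | hy)
              · exact h3
              · exact fun hmem => hs y hy ((PySem.Set.mem_add _ _ _).mpr (Or.inl hmem))
          · rintro ⟨hr, ⟨hxxs, hn⟩, hs⟩
            refine ⟨fun y hy => hr y (Or.inr hy), hn, fun y hy hmem => ?_⟩
            rcases (PySem.Set.mem_add _ _ _).mp hmem with hm | hm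
            · exact hs y (Or.inr hy) hm
            · exact hxxs (hm ▸ hy)

-- the adjacent-pair scan of B is the Chain' relation
theorem zip_tail_all_iff (l : List Int) :
    ((l.zip l.tail).all (fun p => decide (p.1 < p.2)) = true) ↔ l.IsChain (· < ·) := by
  induction l with
  | nil => simp
  | cons x xs ih =>
    cases xs with
    | nil => simp [List.IsChain.singleton]
    | cons y ys =>
      simp only [List.tail_cons, List.zip_cons_cons, List.all_cons, Bool.and_eq_true,
        decide_eq_true_eq, List.isChain_cons_cons]
      rw [← ih]
      simp [List.tail_cons]

-- in a ≤-sorted list every element is at most the last one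
theorem le_getLast_of_pairwise (l : List Int) (h : l.Pairwise (· ≤ ·)) (hne : l ≠ []) :
    ∀ y ∈ l, y ≤ l.getLast hne := by
  induction l with
  | nil => simp
  | cons x xs ih =>
    rcases List.pairwise_cons.mp h with ⟨hx, hxs⟩
    cases xs with
    | nil => simp
    | cons z zs =>
      intro y hy
      rw [List.getLast_cons (by simp)]
      rcases List.mem_cons.mp hy with rfl | hy'
      · exact le_trans (hx _ (List.getLast_mem _)) (le_refl _)
      · exact ih hxs (by simp) y hy'

-- ===== VERDICT (by name: the statement is the Claim_ definition above) =====
theorem check_numbers_validity_spec : Claim_equal_check_numbers_validity := by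
  intro matrix _
  unfold Spec_check_numbers_validity check_numbers_validity check_numbers_validity_alt
  set flat := matrix.flatMap (fun row => row) with hflat
  set n : Int := (matrix.length : Int) with hn
  have hA : (pvRowsA (n ^ 2) PySem.Set.empty matrix).isSome = true ↔
      ((∀ x ∈ flat, 1 ≤ x ∧ x ≤ n ^ 2) ∧ flat.Nodup) := by
    rw [pvRowsA_eq_flat, pvRowA_isSome_iff]
    constructor
    · rintro ⟨hr, hnd, -⟩; exact ⟨hr, hnd⟩
    · rintro ⟨hr, hnd⟩
      exact ⟨hr, hnd, fun x _ => by simp [PySem.Set.empty]⟩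
  have hperm : (PySem.List.sorted flat (fun x => x) false).Perm flat := PySem.List.sorted_perm _ _ _
  have hpw : (PySem.List.sorted flat (fun x => x) false).Pairwise (fun a b => a ≤ b) := by
    simpa using PySem.List.sorted_pairwise (xs := flat) (key := fun x => x)
  rw [Bool.eq_iff_iff, hA]
  cases hs : PySem.List.sorted flat (fun x => x) false with
  | nil =>
    have : flat = [] := by
      have := hperm; rw [hs] at this; exact (List.Perm.nil_eq this).symm
    simp [this]
  | cons x rest =>
    rw [hs] at hperm hpw
    have hmem : ∀ y, y ∈ (x :: rest) ↔ y ∈ flat := fun y => hperm.mem_iff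
    have hmin : ∀ y ∈ flat, x ≤ y := by
      intro y hy
      have := PySem.List.key_head_sorted_le (xs := flat) (key := fun z => z) hs y hy
      simpa using this
    simp only
    split_ifs with hcond
    · -- A must be false: some element out of range
      simp only [Bool.or_eq_true, decide_eq_true_eq] at hcond
      constructor
      · rintro ⟨hr, -⟩
        exfalso
        rcases hcond with hlt | hgt
        · have hxmem : x ∈ flat := (hmem x).mp (List.mem_cons_self)
          have := (hr x hxmem).1; omega
        · set L := (x :: rest).getLast (List.cons_ne_nil x rest) with hL
          have hLmem : L ∈ flat := (hmem L).mp (List.getLast_mem _)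
          have := (hr L hLmem).2
          have : L ≤ n ^ 2 := this
          have : n * n = n ^ 2 := by ring
          omega
      · simp
    · simp only [Bool.or_eq_true, decide_eq_true_eq, not_or, not_lt] at hcond
      obtain ⟨hx1, hLle⟩ := hcond
      have hz := zip_tail_all_iff (x :: rest)
      simp only [List.tail_cons] at hz
      rw [hz]
      have hchain : (x :: rest).IsChain (fun a b => a < b) ↔ (x :: rest).Pairwise (fun a b => a < b) :=
        List.isChain_iff_pairwise
      rw [Bool.eq_iff_iff] at *
      constructor
      · rintro ⟨hr, hnd⟩
        rw [hchain]
        have hnd' : (x :: rest).Nodup := hperm.nodup_iff.mpr hnd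
        have := List.Pairwise.and hpw hnd'
        exact this.imp (fun {a b} h => lt_of_le_of_ne h.1 h.2)
      · intro hch
        have hplt : (x :: rest).Pairwise (fun a b => a < b) := hchain.mp hch
        have hnd : flat.Nodup := hperm.nodup_iff.mp (hplt.imp (fun {a b} h => ne_of_lt h))
        refine ⟨fun y hy => ⟨le_trans hx1 (hmin y hy), ?_⟩, hnd⟩
        have hymax : y ≤ (x :: rest).getLast (List.cons_ne_nil x rest) :=
          le_getLast_of_pairwise _ hpw _ y ((hmem y).mpr hy)
        have : n * n = n ^ 2 := by ring
        omega
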